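-- pv_equiv track=rewrite | github.com/miounet11/mytokes | app/utils/json_parser.py | fix_single_quotes
-- ===== SOURCE A (Python) =====
-- def fix_single_quotes(json_str: str) -> str:
--     """将单引号转换为双引号（仅在 JSON 键值对中）"""
--     # 简单实现：只处理明显的单引号键
--     # 完整实现需要更复杂的状态机
--     result = []
--     i = 0
--     n = len(json_str)
--
--     while i < n:
--         char = json_str[i]
--
--         # 检查是否是单引号开始的键或值
--         if char == "'":
--             # 查找配对的单引号
--             j = i + 1
--             while j < n and json_str[j] != "'":
--                 if json_str[j] == '\\':
--                     j += 1
--                 j += 1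
--
--             if j < n:
--                 # 找到配对，转换为双引号
--                 result.append('"')
--                 result.append(json_str[i+1:j])
--                 result.append('"')
--                 i = j + 1
--                 continue
--
--         result.append(char)
--         i += 1
--
--     return ''.join(result)
-- ===== SOURCE B (Python) =====
-- def fix_single_quotes(json_str: str) -> str:
--     """Single forward pass with an explicit outside/inside-quote state machine
--     (no re-scanning); an unterminated quote flushes its buffered tail verbatim."""
--     out = []
--     buf = None   # None = outside a single-quoted run; else chars seen since the opening quote
--     esc = False  # inside a run, previous char was an unconsumed backslash
--     for c in json_str:
--         if buf is None:
--             if c == "'":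
--                 buf = []
--             else:
--                 out.append(c)
--         elif esc:
--             buf.append(c)
--             esc = False
--         elif c == "'":
--             out.append('"')
--             out.extend(buf)
--             out.append('"')
--             buf = None
--         elif c == '\\':
--             buf.append(c)
--             esc = True
--         else:
--             buf.append(c)
--     if buf is not None:
--         out.append("'")
--         out.extend(buf)
--     return ''.join(out)
-- ===== Notes on version B (the rewrite author's own statement) =====
-- stated objective: faster
-- what changed: Replaced A's index-based while loop that re-scans ahead for a matching quote at every opening quote (and slices the content a second time) with a single forward pass maintaining an outside/inside-quote state and a buffer that is flushed verbatim on an unterminated quote.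
import Mathlib
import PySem

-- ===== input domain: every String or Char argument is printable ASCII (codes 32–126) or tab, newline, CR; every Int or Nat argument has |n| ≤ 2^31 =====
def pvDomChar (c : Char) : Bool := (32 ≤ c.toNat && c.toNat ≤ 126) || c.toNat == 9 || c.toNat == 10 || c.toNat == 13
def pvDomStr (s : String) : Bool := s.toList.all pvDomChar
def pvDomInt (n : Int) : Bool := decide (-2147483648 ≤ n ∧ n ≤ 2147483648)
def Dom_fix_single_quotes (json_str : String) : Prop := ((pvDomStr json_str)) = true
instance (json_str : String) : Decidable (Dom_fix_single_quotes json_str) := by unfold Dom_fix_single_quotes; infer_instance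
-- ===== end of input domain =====

-- B replaces A's per-quote forward re-scan with a single pass keeping an
-- outside/inside-quote state and a buffer (an alternative algorithm, same result).

-- ===== PORT A =====
-- inner while loop of A: advance j past escaped pairs until a quote or the end
def scanA (cs : List Char) (n j : Nat) : Nat :=
  if _h : j < n then
    if cs.getD j ' ' = '\'' then j
    else if cs.getD j ' ' = '\\' then scanA cs n (j + 2) else scanA cs n (j + 1)
  else j
termination_by n - j

-- one-step unfolding of the inner while loop (used by the proofs and by loopA's termination)
theorem scanA_unfold (cs : List Char) (n j : Nat) :
    scanA cs n j = if j < n then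
      (if cs.getD j ' ' = '\'' then j
       else if cs.getD j ' ' = '\\' then scanA cs n (j + 2) else scanA cs n (j + 1))
    else j := by
  conv_lhs => rw [scanA]
  rfl

theorem scanA_ge (cs : List Char) (n j : Nat) : j ≤ scanA cs n j := by
  induction j using scanA.induct cs n with
  | case1 x h hq => rw [scanA_unfold, if_pos h, if_pos hq]
  | case2 x h hq hb ih => rw [scanA_unfold, if_pos h, if_neg hq, if_pos hb]; omega
  | case3 x h hq hb ih => rw [scanA_unfold, if_pos h, if_neg hq, if_neg hb]; omega
  | case4 x h => rw [scanA_unfold, if_neg h]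

-- outer while loop of A; acc plays the role of `result` (chars instead of string pieces)
def loopA (cs : List Char) (n i : Nat) (acc : List Char) : List Char :=
  if _h : i < n then
    let c := cs.getD i ' '
    if c = '\'' then
      let j := scanA cs n (i + 1)
      if _hj : j < n then
        -- json_str[i+1:j] with i+1 ≤ j ≤ n is (cs.drop (i+1)).take (j - (i+1))
        loopA cs n (j + 1) (acc ++ '"' :: ((cs.drop (i + 1)).take (j - (i + 1)) ++ ['"']))
      else loopA cs n (i + 1) (acc ++ [c])
    else loopA cs n (i + 1) (acc ++ [c])
  else acc
termination_by n - i
decreasing_by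
  · have := scanA_ge cs n (i + 1); omega
  · omega
  · omega

def fix_single_quotes (json_str : String) : String :=
  String.mk (loopA json_str.toList json_str.toList.length 0 [])

-- ===== PORT B =====
-- one step of B's for-loop; state = (out, buf : None|list, esc)
def stepB (st : List Char × Option (List Char) × Bool) (c : Char) :
    List Char × Option (List Char) × Bool :=
  match st with
  | (out, none, _) => if c = '\'' then (out, some [], false) else (out ++ [c], none, false)
  | (out, some buf, true) => (out, some (buf ++ [c]), false)
  | (out, some buf, false) =>
      if c = '\'' then (out ++ '"' :: (buf ++ ['"']), none, false)
      else if c = '\\' then (out, some (buf ++ [c]), true)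
      else (out, some (buf ++ [c]), false)

-- B's trailing `if buf is not None` flush
def finishB (st : List Char × Option (List Char) × Bool) : List Char :=
  match st with
  | (out, some buf, _) => out ++ '\'' :: buf
  | (out, none, _) => out

def fix_single_quotes_alt (json_str : String) : String :=
  String.mk (finishB (json_str.toList.foldl stepB ([], none, false)))

-- ===== PRECONDITION & SPEC =====
def Spec_fix_single_quotes (json_str : String) (out : String) : Prop := out = fix_single_quotes_alt json_str
instance (json_str : String) (out : String) : Decidable (Spec_fix_single_quotes json_str out) := by unfold Spec_fix_single_quotes; infer_instance

-- ===== CLAIM (what is proved, stated in full; the proofs are below) =====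
def Claim_equal_fix_single_quotes : Prop := ∀ (json_str : String), Dom_fix_single_quotes json_str → Spec_fix_single_quotes json_str (fix_single_quotes json_str)

-- ===== LEMMAS AND PROOFS =====

-- reference scanner: split a suffix into (content, rest) at the first unescaped quote
def scanQ : List Char → Option (List Char × List Char)
  | [] => none
  | c :: t =>
    if c = '\'' then some ([], t)
    else if c = '\\' then
      match t with
      | [] => none
      | d :: r => (scanQ r).map (fun p => (c :: d :: p.1, p.2))
    else (scanQ t).map (fun p => (c :: p.1, p.2))

theorem scanQ_quote (t : List Char) : scanQ ('\'' :: t) = some ([], t) := by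
  rw [scanQ.eq_def]; simp

theorem scanQ_backslash_nil : scanQ ['\\'] = none := by rw [scanQ.eq_def]; simp

theorem scanQ_backslash (d : Char) (t : List Char) :
    scanQ ('\\' :: d :: t) = (scanQ t).map (fun p => ('\\' :: d :: p.1, p.2)) := by
  rw [scanQ.eq_def]; simp

theorem scanQ_other (c : Char) (t : List Char) (hq : c ≠ '\'') (hb : c ≠ '\\') :
    scanQ (c :: t) = (scanQ t).map (fun p => (c :: p.1, p.2)) := by
  rw [scanQ.eq_def]; simp [hq, hb]

theorem scanQ_decomp (t co r : List Char) (h : scanQ t = some (co, r)) :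
    t = co ++ '\'' :: r := by
  induction t using scanQ.induct generalizing co r with
  | case1 => simp [scanQ] at h
  | case2 t =>
      rw [scanQ_quote, Option.some_inj, Prod.mk.injEq] at h
      simp [← h.1, ← h.2]
  | case3 hq => rw [scanQ_backslash_nil] at h; cases h
  | case4 d r' hq ih =>
      rw [scanQ_backslash] at h
      cases hs : scanQ r' with
      | none => rw [hs] at h; cases h
      | some p =>
        obtain ⟨p1, p2⟩ := p
        rw [hs, Option.map_some, Option.some_inj, Prod.mk.injEq] at h
        obtain ⟨h1, h2⟩ := h
        subst h1 h2
        simp [ih _ _ hs]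
  | case5 c t hq hb ih =>
      rw [scanQ_other c t hq hb] at h
      cases hs : scanQ t with
      | none => rw [hs] at h; cases h
      | some p =>
        obtain ⟨p1, p2⟩ := p
        rw [hs, Option.map_some, Option.some_inj, Prod.mk.injEq] at h
        obtain ⟨h1, h2⟩ := h
        subst h1 h2
        simp [ih _ _ hs]

-- reference one-pass rewriting (what both programs compute)
def goB : List Char → List Char
  | [] => []
  | c :: t =>
    if c = '\'' then
      match hs : scanQ t with
      | some (co, r) => '"' :: co ++ '"' :: goB r
      | none => c :: t
    else c :: goB t
termination_by l => l.length
decreasing_by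
  · have := scanQ_decomp t co r hs
    subst this; simp; omega
  · simp

theorem goB_nil : goB [] = [] := by rw [goB.eq_def]

theorem goB_quote_some (t co r : List Char) (hs : scanQ t = some (co, r)) :
    goB ('\'' :: t) = '"' :: co ++ '"' :: goB r := by
  rw [goB.eq_def]
  simp only [reduceIte]
  split
  · rename_i co' r' heq
    rw [hs, Option.some_inj, Prod.mk.injEq] at heq
    obtain ⟨h1, h2⟩ := heq
    subst h1 h2
    rfl
  · rename_i heq
    rw [hs] at heq
    cases heq

theorem goB_quote_none (t : List Char) (hs : scanQ t = none) :
    goB ('\'' :: t) = '\'' :: t := by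
  rw [goB.eq_def]
  simp only [reduceIte]
  split
  · rename_i co' r' heq
    rw [hs] at heq
    cases heq
  · rfl

theorem goB_other (c : Char) (t : List Char) (hq : c ≠ '\'') :
    goB (c :: t) = c :: goB t := by
  rw [goB.eq_def]; simp [hq]

-- ---- A-side ----

theorem loopA_unfold (cs : List Char) (n i : Nat) (acc : List Char) :
    loopA cs n i acc = if i < n then
      (if cs.getD i ' ' = '\'' then
        (if scanA cs n (i + 1) < n then
          loopA cs n (scanA cs n (i + 1) + 1)
            (acc ++ '"' :: ((cs.drop (i + 1)).take (scanA cs n (i + 1) - (i + 1)) ++ ['"']))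
        else loopA cs n (i + 1) (acc ++ [cs.getD i ' ']))
      else loopA cs n (i + 1) (acc ++ [cs.getD i ' ']))
    else acc := by
  conv_lhs => rw [loopA]
  rfl

theorem drop_cons_of (cs : List Char) (j : Nat) (c : Char) (t : List Char)
    (h : cs.drop j = c :: t) : j < cs.length ∧ cs.getD j ' ' = c ∧ cs.drop (j + 1) = t := by
  have hj : j < cs.length := by
    by_contra hn
    rw [List.drop_eq_nil_of_le (by omega)] at h
    exact (List.cons_ne_nil _ _) h.symm
  have h2 : cs.drop j = cs[j] :: cs.drop (j + 1) := List.drop_eq_getElem_cons hj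
  rw [h2] at h
  injection h with h3 h4
  refine ⟨hj, ?_, h4⟩
  rw [List.getD_eq_getElem _ _ hj, h3]

theorem drop_nil_of (cs : List Char) (j : Nat) (h : cs.drop j = []) : cs.length ≤ j := by
  by_contra hn
  rw [List.drop_eq_getElem_cons (by omega)] at h
  exact (List.cons_ne_nil _ _) h

theorem scanA_some (cs : List Char) (j : Nat) (co r : List Char)
    (h : scanQ (cs.drop j) = some (co, r)) :
    scanA cs cs.length j = j + co.length ∧ cs.drop (j + co.length) = '\'' :: r := by
  cases hd : cs.drop j with
  | nil => rw [hd] at h; cases h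
  | cons c t =>
    obtain ⟨hj, hc, ht⟩ := drop_cons_of cs j c t hd
    rw [hd] at h
    by_cases hq : c = '\''
    · subst hq
      rw [scanQ_quote, Option.some_inj, Prod.mk.injEq] at h
      obtain ⟨h1, h2⟩ := h
      subst h1 h2
      constructor
      · rw [scanA_unfold, if_pos hj, if_pos hc]; simp
      · simpa using hd
    · by_cases hb : c = '\\'
      · subst hb
        cases t with
        | nil => rw [scanQ_backslash_nil] at h; cases h
        | cons d r' =>
          rw [scanQ_backslash] at h
          cases hs : scanQ r' with
          | none => rw [hs] at h; cases h
          | some p =>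
            obtain ⟨p1, p2⟩ := p
            rw [hs, Option.map_some, Option.some_inj, Prod.mk.injEq] at h
            obtain ⟨h1, h2⟩ := h
            subst h1 h2
            have ht2 : cs.drop (j + 2) = r' := by
              obtain ⟨_, _, h3⟩ := drop_cons_of cs (j + 1) d r' ht
              simpa [show j + 1 + 1 = j + 2 by omega] using h3
            have ih := scanA_some cs (j + 2) p1 p2 (by rw [ht2]; exact hs)
            constructor
            · rw [scanA_unfold, if_pos hj, hc, if_neg (by decide), if_pos rfl, ih.1]
              simp; omega
            · have := ih.2
              rw [show j + ('\\' :: d :: p1).length = j + 2 + p1.length by simp; omega]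
              exact this
      · rw [scanQ_other c t hq hb] at h
        cases hs : scanQ t with
        | none => rw [hs] at h; cases h
        | some p =>
          obtain ⟨p1, p2⟩ := p
          rw [hs, Option.map_some, Option.some_inj, Prod.mk.injEq] at h
          obtain ⟨h1, h2⟩ := h
          subst h1 h2
          have ih := scanA_some cs (j + 1) p1 p2 (by rw [ht]; exact hs)
          constructor
          · rw [scanA_unfold, if_pos hj, hc, if_neg hq, if_neg hb, ih.1]
            simp; omega
          · have := ih.2
            rw [show j + (c :: p1).length = j + 1 + p1.length by simp; omega]
            exact this
termination_by cs.length - j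
decreasing_by all_goals omega

theorem scanA_none (cs : List Char) (j : Nat) (h : scanQ (cs.drop j) = none) :
    cs.length ≤ scanA cs cs.length j := by
  cases hd : cs.drop j with
  | nil =>
    have hj := drop_nil_of cs j hd
    rw [scanA_unfold, if_neg (by omega)]
    exact hj
  | cons c t =>
    obtain ⟨hj, hc, ht⟩ := drop_cons_of cs j c t hd
    rw [hd] at h
    by_cases hq : c = '\''
    · subst hq; rw [scanQ_quote] at h; cases h
    · by_cases hb : c = '\\'
      · subst hb
        cases t with
        | nil =>
          have hj2 := drop_nil_of cs (j + 1) ht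
          rw [scanA_unfold, if_pos hj, hc, if_neg (by decide), if_pos rfl]
          have := scanA_ge cs cs.length (j + 2)
          omega
        | cons d r' =>
          rw [scanQ_backslash] at h
          cases hs : scanQ r' with
          | some p => rw [hs] at h; cases h
          | none =>
            have ht2 : cs.drop (j + 2) = r' := by
              obtain ⟨_, _, h3⟩ := drop_cons_of cs (j + 1) d r' ht
              simpa [show j + 1 + 1 = j + 2 by omega] using h3
            have ih := scanA_none cs (j + 2) (by rw [ht2]; exact hs)
            rw [scanA_unfold, if_pos hj, hc, if_neg (by decide), if_pos rfl]
            exact ih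
      · rw [scanQ_other c t hq hb] at h
        cases hs : scanQ t with
        | some p => rw [hs] at h; cases h
        | none =>
          have ih := scanA_none cs (j + 1) (by rw [ht]; exact hs)
          rw [scanA_unfold, if_pos hj, hc, if_neg hq, if_neg hb]
          exact ih
termination_by cs.length - j
decreasing_by all_goals omega

-- after a failed scan the whole remaining suffix is emitted verbatim
theorem loopA_raw (cs : List Char) (j : Nat) (acc : List Char)
    (h : cs.length ≤ scanA cs cs.length j) :
    loopA cs cs.length j acc = acc ++ cs.drop j := by
  cases hd : cs.drop j with
  | nil =>
    have hj := drop_nil_of cs j hd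
    rw [loopA_unfold, if_neg (by omega)]
    simp
  | cons c t =>
    obtain ⟨hj, hc, ht⟩ := drop_cons_of cs j c t hd
    have hq : c ≠ '\'' := by
      intro hq
      rw [scanA_unfold, if_pos hj, hc, if_pos hq] at h
      omega
    have hstep : scanA cs cs.length j =
        (if c = '\\' then scanA cs cs.length (j + 2) else scanA cs cs.length (j + 1)) := by
      rw [scanA_unfold, if_pos hj, hc, if_neg hq]
    by_cases hb : c = '\\'
    · rw [hstep, if_pos hb] at h
      cases ht2 : cs.drop (j + 1) with
      | nil =>
        have hj2 := drop_nil_of cs (j + 1) ht2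
        have ht0 : t = [] := by rw [← ht, ht2]
        subst ht0
        rw [loopA_unfold, if_pos hj, hc, if_neg hq]
        rw [loopA_unfold, if_neg (by omega)]
      | cons d r' =>
        obtain ⟨hj2, hc2, ht3⟩ := drop_cons_of cs (j + 1) d r' ht2
        have ht4 : cs.drop (j + 2) = r' := by
          simpa [show j + 1 + 1 = j + 2 by omega] using ht3
        have ht0 : t = d :: r' := by rw [← ht, ht2]
        have ih := loopA_raw cs (j + 2) (acc ++ [c] ++ [d]) (by omega)
        have e3 : j + 1 + 1 = j + 2 := by omega
        rw [loopA_unfold, if_pos hj, hc, if_neg hq]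
        by_cases hd2 : d = '\''
        · -- next char is a quote: its own scan starts at j+2 and also fails
          rw [loopA_unfold, if_pos hj2, hc2, if_pos hd2, e3]
          rw [if_neg (by omega)]
          rw [ih, ht4, ht0]
          simp
        · rw [loopA_unfold, if_pos hj2, hc2, if_neg hd2, e3]
          rw [ih, ht4, ht0]
          simp
    · rw [hstep, if_neg hb] at h
      have ih := loopA_raw cs (j + 1) (acc ++ [c]) h
      rw [loopA_unfold, if_pos hj, hc, if_neg hq]
      rw [ih, ht]
      simp
termination_by cs.length - j
decreasing_by all_goals omega

theorem loopA_goB (cs : List Char) (j : Nat) (acc : List Char) :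
    loopA cs cs.length j acc = acc ++ goB (cs.drop j) := by
  cases hd : cs.drop j with
  | nil =>
    have hj := drop_nil_of cs j hd
    rw [loopA_unfold, if_neg (by omega), goB_nil]
    simp
  | cons c t =>
    obtain ⟨hj, hc, ht⟩ := drop_cons_of cs j c t hd
    by_cases hq : c = '\''
    · subst hq
      cases hs : scanQ t with
      | some p =>
        obtain ⟨co, r⟩ := p
        have hsc := scanA_some cs (j + 1) co r (by rw [ht]; exact hs)
        have hk : scanA cs cs.length (j + 1) = j + 1 + co.length := hsc.1
        have hrest : cs.drop (j + 1 + co.length) = '\'' :: r := hsc.2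
        obtain ⟨hklt, _, hdrop⟩ := drop_cons_of cs (j + 1 + co.length) '\'' r hrest
        have ih := loopA_goB cs (j + 1 + co.length + 1)
          (acc ++ '"' :: ((cs.drop (j + 1)).take (j + 1 + co.length - (j + 1)) ++ ['"']))
        rw [loopA_unfold, if_pos hj, hc, if_pos rfl, hk]
        rw [if_pos hklt, ih, hdrop]
        have htake : (cs.drop (j + 1)).take (j + 1 + co.length - (j + 1)) = co := by
          rw [ht, show j + 1 + co.length - (j + 1) = co.length by omega]
          rw [scanQ_decomp t co r hs]
          simp
        rw [htake, goB_quote_some t co r hs]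
        simp
      | none =>
        have hsc := scanA_none cs (j + 1) (by rw [ht]; exact hs)
        rw [loopA_unfold, if_pos hj, hc, if_pos rfl]
        rw [if_neg (by omega)]
        rw [loopA_raw cs (j + 1) (acc ++ ['\'']) hsc, ht, goB_quote_none t hs]
        simp
    · have ih := loopA_goB cs (j + 1) (acc ++ [c])
      rw [loopA_unfold, if_pos hj, hc, if_neg hq]
      rw [ih, ht, goB_other c t hq]
      simp
termination_by cs.length - j
decreasing_by all_goals omega

-- ---- B-side ----

theorem foldB_some (t co r out buf : List Char) (h : scanQ t = some (co, r)) :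
    t.foldl stepB (out, some buf, false) =
      r.foldl stepB (out ++ '"' :: (buf ++ co ++ ['"']), none, false) := by
  induction t using scanQ.induct generalizing co r buf with
  | case1 => cases h
  | case2 t =>
      rw [scanQ_quote, Option.some_inj, Prod.mk.injEq] at h
      obtain ⟨h1, h2⟩ := h
      subst h1 h2
      simp [stepB]
  | case3 hq => rw [scanQ_backslash_nil] at h; cases h
  | case4 d r' hq ih =>
      rw [scanQ_backslash] at h
      cases hs : scanQ r' with
      | none => rw [hs] at h; cases h
      | some p =>
        obtain ⟨p1, p2⟩ := p
        rw [hs, Option.map_some, Option.some_inj, Prod.mk.injEq] at h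
        obtain ⟨h1, h2⟩ := h
        subst h1 h2
        simp only [List.foldl_cons, stepB, if_neg hq, reduceIte]
        rw [ih p1 p2 (buf ++ ['\\'] ++ [d]) hs]
        simp
  | case5 c t hq hb ih =>
      rw [scanQ_other c t hq hb] at h
      cases hs : scanQ t with
      | none => rw [hs] at h; cases h
      | some p =>
        obtain ⟨p1, p2⟩ := p
        rw [hs, Option.map_some, Option.some_inj, Prod.mk.injEq] at h
        obtain ⟨h1, h2⟩ := h
        subst h1 h2
        simp only [List.foldl_cons, stepB, if_neg hq, if_neg hb]
        rw [ih p1 p2 (buf ++ [c]) hs]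
        simp

theorem foldB_none (t out buf : List Char) (h : scanQ t = none) :
    ∃ b, t.foldl stepB (out, some buf, false) = (out, some (buf ++ t), b) := by
  induction t using scanQ.induct generalizing buf with
  | case1 => exact ⟨false, by simp⟩
  | case2 t => rw [scanQ_quote] at h; cases h
  | case3 hq => exact ⟨true, by simp [stepB]⟩
  | case4 d r' hq ih =>
      rw [scanQ_backslash] at h
      cases hs : scanQ r' with
      | some p => rw [hs] at h; cases h
      | none =>
        simp only [List.foldl_cons, stepB, if_neg hq, reduceIte]
        obtain ⟨b, hb2⟩ := ih (buf ++ ['\\'] ++ [d]) hs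
        exact ⟨b, by rw [hb2]; simp⟩
  | case5 c t hq hb ih =>
      rw [scanQ_other c t hq hb] at h
      cases hs : scanQ t with
      | some p => rw [hs] at h; cases h
      | none =>
        simp only [List.foldl_cons, stepB, if_neg hq, if_neg hb]
        obtain ⟨b, hb2⟩ := ih (buf ++ [c]) hs
        exact ⟨b, by rw [hb2]; simp⟩

theorem foldB_goB (t out : List Char) :
    finishB (t.foldl stepB (out, none, false)) = out ++ goB t := by
  induction t using goB.induct generalizing out with
  | case1 => simp [finishB, goB_nil]
  | case2 t co r hs ih =>
      simp only [List.foldl_cons, stepB, reduceIte]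
      rw [foldB_some t co r out [] hs]
      rw [ih (out ++ '"' :: ([] ++ co ++ ['"']))]
      rw [goB_quote_some t co r hs]
      simp
  | case3 t hs =>
      simp only [List.foldl_cons, stepB, reduceIte]
      obtain ⟨b, hb2⟩ := foldB_none t out [] hs
      rw [hb2]
      simp [finishB, goB_quote_none t hs]
  | case4 c t hq ih =>
      simp only [List.foldl_cons, stepB, if_neg hq]
      rw [ih (out ++ [c]), goB_other c t hq]
      simp

-- ===== VERDICT (by name: the statement is the Claim_ definition above) =====
theorem fix_single_quotes_spec : Claim_equal_fix_single_quotes := by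
  intro s _
  unfold Spec_fix_single_quotes fix_single_quotes fix_single_quotes_alt
  rw [loopA_goB s.toList 0 [], foldB_goB s.toList []]
  simp
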